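-- pv_equiv track=rewrite | github.com/WSm-77/text_algorithms | lab6/naive_edit_distance.py | naive_edit_distance_with_operations
-- ===== SOURCE A (Python) =====
-- def naive_edit_distance_with_operations(s1: str, s2: str) -> tuple[int, list[str]]:
--     """
--     Oblicza odległość edycyjną i zwraca listę operacji potrzebnych do przekształcenia s1 w s2.
--
--     Args:
--         s1: Pierwszy ciąg znaków
--         s2: Drugi ciąg znaków
--
--     Returns:
--         Krotka zawierająca odległość edycyjną i listę operacji
--         Operacje: "INSERT x", "DELETE x", "REPLACE x->y", "MATCH x"
--     """
--     if len(s1) == 0: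
--         return len(s2), [f"INSERT {char}" for char in s2]
--     elif len(s2) == 0:
--         return len(s1), [f"DELETE {char}" for char in s1]
--     elif s1[0] == s2[0]:
--         dist, operations = naive_edit_distance_with_operations(s1[1:], s2[1:])
--         return dist, operations + [f"MATCH {s1[0]}"]
--
--     dist_delete, operations_delete = naive_edit_distance_with_operations(s1[1:], s2)
--     dist_insert, operations_insert = naive_edit_distance_with_operations(s1, s2[1:])
--     dist_replace, operations_replace = naive_edit_distance_with_operations(s1[1:], s2[1:])
--     res_dist, res_operations = dist_delete, operations_delete + [f"DELETE {s1[0]}"]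
--
--     if dist_insert < res_dist:
--         res_dist, res_operations = dist_insert, operations_insert + [f"INSERT {s2[0]}"]
--     if dist_replace < res_dist:
--         res_dist, res_operations = dist_replace, operations_replace + [f"REPLACE {s1[0]}->{s2[0]}"]
--
--     return res_dist + 1, res_operations
-- ===== SOURCE B (Python) =====
-- def naive_edit_distance_with_operations(s1: str, s2: str) -> tuple[int, list[str]]:
--     """Bottom-up DP over suffixes (O(m*n)) with the same tie-break order as the
--     naive recursion: delete, then insert/replace only if strictly cheaper."""
--     m, n = len(s1), len(s2)
--     # row[j] = (distance, operations) for transforming s1[i:] into s2[j:]; start with i = m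
--     row = [(n - j, ["INSERT " + c for c in s2[j:]]) for j in range(n + 1)]
--     for i in range(m - 1, -1, -1):
--         c = s1[i]
--         new = [(0, [])] * (n + 1)
--         new[n] = (m - i, ["DELETE " + ch for ch in s1[i:]])
--         for j in range(n - 1, -1, -1):
--             if c == s2[j]:
--                 d, ops = row[j + 1]
--                 new[j] = (d, ops + ["MATCH " + c])
--             else:
--                 best = (row[j][0], row[j][1] + ["DELETE " + c])
--                 if new[j + 1][0] < best[0]:
--                     best = (new[j + 1][0], new[j + 1][1] + ["INSERT " + s2[j]])
--                 if row[j + 1][0] < best[0]: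
--                     best = (row[j + 1][0], row[j + 1][1] + ["REPLACE " + c + "->" + s2[j]])
--                 new[j] = (best[0] + 1, best[1])
--         row = new
--     return row[0]
-- ===== Notes on version B (the rewrite author's own statement) =====
-- stated objective: faster
-- what changed: Replaced the exponential three-way recursion by a bottom-up dynamic-programming table over suffixes (two rows), reproducing the same tie-break order (delete, then strictly cheaper insert, then strictly cheaper replace) and operation-list order; intended as asymptotically faster — a timing run could not measure a ratio because A already times out at n=16 where B returns.
import Mathlib
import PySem

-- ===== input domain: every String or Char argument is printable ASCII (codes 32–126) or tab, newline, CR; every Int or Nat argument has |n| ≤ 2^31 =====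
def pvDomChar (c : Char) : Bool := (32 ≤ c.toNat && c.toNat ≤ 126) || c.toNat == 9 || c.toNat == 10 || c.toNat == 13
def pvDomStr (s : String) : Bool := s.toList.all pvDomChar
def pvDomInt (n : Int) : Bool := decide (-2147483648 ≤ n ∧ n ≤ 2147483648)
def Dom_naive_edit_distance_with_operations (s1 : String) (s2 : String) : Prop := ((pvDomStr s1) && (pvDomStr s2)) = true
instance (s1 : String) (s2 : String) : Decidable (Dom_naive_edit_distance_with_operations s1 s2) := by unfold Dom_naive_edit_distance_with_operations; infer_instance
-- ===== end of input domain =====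

-- B replaces A's exponential three-way recursion by a bottom-up DP over suffixes with the
-- same tie-break and list order (objective: faster; intended asymptotic — a timing run could not
-- measure a ratio: A times out at n=16 where B returns).

-- ===== PORT A =====
-- literal transliteration of A's recursion (slices s[1:] become list tails)
def pvNaiveAux : List Char → List Char → Int × List String
  | [], l2 => ((l2.length : Int), l2.map fun c => "INSERT ".push c)
  | c1 :: t1, [] => (((c1 :: t1).length : Int), (c1 :: t1).map fun c => "DELETE ".push c)
  | c1 :: t1, c2 :: t2 =>
    if c1 == c2 then
      let r := pvNaiveAux t1 t2
      (r.1, r.2 ++ ["MATCH ".push c1])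
    else
      let rd := pvNaiveAux t1 (c2 :: t2)
      let ri := pvNaiveAux (c1 :: t1) t2
      let rr := pvNaiveAux t1 t2
      let res := (rd.1, rd.2 ++ ["DELETE ".push c1])
      let res := if ri.1 < res.1 then (ri.1, ri.2 ++ ["INSERT ".push c2]) else res
      let res := if rr.1 < res.1 then (rr.1, rr.2 ++ [("REPLACE ".push c1 ++ "->").push c2]) else res
      (res.1 + 1, res.2)
  termination_by l1 l2 => l1.length + l2.length
  decreasing_by all_goals simp <;> omega

def naive_edit_distance_with_operations (s1 : String) (s2 : String) : Int × List String :=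
  pvNaiveAux s1.toList s2.toList

-- ===== PORT B =====
-- base row: entry j is the answer for (""-suffix of s1, s2[j:]) — i.e. all inserts
def pvBaseRow : List Char → List (Int × List String)
  | [] => [(0, [])]
  | c :: t => (((c :: t).length : Int), (c :: t).map fun ch => "INSERT ".push ch) :: pvBaseRow t

-- one DP step: given the row for suffix t1 of s1 (entry j = answer for (t1, l2[j:])),
-- build the row for c1 :: t1, right to left
def pvBuildRow (c1 : Char) (t1 : List Char) : List Char → List (Int × List String) → List (Int × List String)
  | [], _ => [(((c1 :: t1).length : Int), (c1 :: t1).map fun ch => "DELETE ".push ch)]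
  | c2 :: t2, next =>
    let rest := pvBuildRow c1 t1 t2 next.tail
    let nj := next.headD (0, [])
    let njp := next.tail.headD (0, [])
    let cur :=
      if c1 == c2 then (njp.1, njp.2 ++ ["MATCH ".push c1])
      else
        let down := rest.headD (0, [])
        let res := (nj.1, nj.2 ++ ["DELETE ".push c1])
        let res := if down.1 < res.1 then (down.1, down.2 ++ ["INSERT ".push c2]) else res
        let res := if njp.1 < res.1 then (njp.1, njp.2 ++ [("REPLACE ".push c1 ++ "->").push c2]) else res
        (res.1 + 1, res.2)
    cur :: rest

def pvRows : List Char → List Char → List (Int × List String)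
  | [], l2 => pvBaseRow l2
  | c :: t, l2 => pvBuildRow c t l2 (pvRows t l2)

def naive_edit_distance_with_operations_alt (s1 : String) (s2 : String) : Int × List String :=
  (pvRows s1.toList s2.toList).headD (0, [])

-- ===== PRECONDITION & SPEC =====
def Spec_naive_edit_distance_with_operations (s1 : String) (s2 : String) (out : Int × List String) : Prop := out = naive_edit_distance_with_operations_alt s1 s2
instance (s1 : String) (s2 : String) (out : Int × List String) : Decidable (Spec_naive_edit_distance_with_operations s1 s2 out) := by unfold Spec_naive_edit_distance_with_operations; infer_instance

-- ===== CLAIM (what is proved, stated in full; the proofs are below) =====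
def Claim_equal_naive_edit_distance_with_operations : Prop := ∀ (s1 : String) (s2 : String), Dom_naive_edit_distance_with_operations s1 s2 → Spec_naive_edit_distance_with_operations s1 s2 (naive_edit_distance_with_operations s1 s2)

-- ===== LEMMAS AND PROOFS =====

-- tail of the row list, for stating the loop invariant
def pvRtail (l1 : List Char) : List Char → List (Int × List String)
  | [] => []
  | _ :: t2 => pvRows l1 t2

-- DP invariant: the row for l1 starts with the naive answer for (l1, l2) and continues with the row for l2.tail
theorem pvRows_spec : ∀ (l1 l2 : List Char), pvRows l1 l2 = pvNaiveAux l1 l2 :: pvRtail l1 l2 := by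
  intro l1
  induction l1 with
  | nil =>
    intro l2
    cases l2 with
    | nil => simp [pvRows, pvBaseRow, pvNaiveAux, pvRtail]
    | cons c2 t2 => simp [pvRows, pvBaseRow, pvNaiveAux, pvRtail]
  | cons c1 t1 ih =>
    intro l2
    induction l2 with
    | nil => simp [pvRows, pvBuildRow, pvNaiveAux, pvRtail]
    | cons c2 t2 ih2 =>
      have hnext : pvRows t1 (c2 :: t2) = pvNaiveAux t1 (c2 :: t2) :: pvRows t1 t2 := by
        rw [ih (c2 :: t2)]; rfl
      have hnt : pvRows t1 t2 = pvNaiveAux t1 t2 :: pvRtail t1 t2 := ih t2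
      have hrest : pvRows (c1 :: t1) t2 = pvNaiveAux (c1 :: t1) t2 :: pvRtail (c1 :: t1) t2 := ih2
      show pvBuildRow c1 t1 (c2 :: t2) (pvRows t1 (c2 :: t2)) = _
      rw [hnext]
      simp only [pvBuildRow, List.tail_cons, List.headD_cons]
      have htail : pvBuildRow c1 t1 t2 (pvRows t1 t2) = pvRows (c1 :: t1) t2 := rfl
      rw [htail, hrest]
      simp only [List.headD_cons, pvRtail]
      rw [hnt]
      simp only [List.headD_cons]
      by_cases h : c1 == c2
      · simp only [h, if_pos, pvNaiveAux]
        rw [hrest]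
        cases t2 <;> rfl
      · simp only [pvNaiveAux]
        rw [hrest]
        simp only [h, Bool.false_eq_true, if_false]
        cases t2 <;> rfl

-- ===== VERDICT (by name: the statement is the Claim_ definition above) =====
theorem naive_edit_distance_with_operations_spec : Claim_equal_naive_edit_distance_with_operations := by
  intro s1 s2 _
  show naive_edit_distance_with_operations s1 s2 = naive_edit_distance_with_operations_alt s1 s2
  unfold naive_edit_distance_with_operations naive_edit_distance_with_operations_alt
  rw [pvRows_spec]
  rfl
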